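-- pv_equiv track=rewrite | github.com/cogito1ergo1sum/Intro_to_CS | Final Assignment/midval.py | unimodal_sort
-- ===== SOURCE A (Python) =====
-- def unimodal_sort(array):
--     # assigned start and end comparison values to 0 and -1
--     # since the list is increasing and then decreasing (unimodal),
--     # it makes sense to compare outside-in as the original array is 2 conjoined sorted lists (increasing+decreasing)
--     # result list starts as empty list before values are sorted into it
--
--     start = 0
--     end = -1
--     result = []
--     #while loop assures loop doesn't continue when array list is empty
--     while len(array) >= 1:
--             # if the value of the first element is less than/equal to the last element, remove 1st element from array and add it to result list
--             if array[start] <= array[end]: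
--                 result.append(array.pop(start))
--             #otherwise vice versa because last element is the lesser value
--             else:
--                 result.append(array.pop(end))
--     #return sorted array (min to max)
--     return result
-- ===== SOURCE B (Python) =====
-- def unimodal_sort(array):
--     # Two-pointer merge over indices instead of A's destructive pop-from-front/
--     # back loop. NOTE: A empties its argument in place; B leaves it untouched --
--     # only the return value is claimed equivalent.
--     i, j = 0, len(array) - 1
--     result = []
--     while i <= j:
--         if array[i] <= array[j]:
--             result.append(array[i])
--             i += 1
--         else:
--             result.append(array[j])
--             j -= 1
--     return result
-- ===== Notes on version B (the rewrite author's own statement) =====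
-- stated objective: faster
-- what changed: Replaces A's destructive loop that pops the smaller of the first/last element from the list (pop(0) shifts the whole list) with a non-mutating two-pointer index loop over the original list.
import Mathlib
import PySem

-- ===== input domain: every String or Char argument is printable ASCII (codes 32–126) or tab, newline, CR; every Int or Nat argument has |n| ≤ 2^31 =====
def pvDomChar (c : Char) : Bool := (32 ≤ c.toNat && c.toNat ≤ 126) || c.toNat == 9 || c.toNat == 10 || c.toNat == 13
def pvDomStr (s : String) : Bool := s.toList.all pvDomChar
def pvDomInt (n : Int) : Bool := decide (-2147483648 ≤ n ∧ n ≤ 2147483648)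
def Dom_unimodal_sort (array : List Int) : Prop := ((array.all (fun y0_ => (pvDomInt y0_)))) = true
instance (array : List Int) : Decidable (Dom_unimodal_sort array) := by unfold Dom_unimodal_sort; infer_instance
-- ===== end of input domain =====

-- B replaces A's destructive pop-from-front/back loop with a non-mutating two-pointer
-- index loop over the original list; A empties its list argument in place, B does not --
-- the equivalence proved here is about the return value only.


-- ===== PORT A =====
-- while len(array) >= 1: pop the first element if array[0] <= array[-1], else the last,
-- appending the popped value to result (array.pop(0) = tail, array.pop(-1) = dropLast).
def unimodal_sortLoop (array result : List Int) : List Int :=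
  if _h : 1 ≤ array.length then
    let a0 := PySem.List.pyGetD array 0 0
    let an := PySem.List.pyGetD array (-1) 0
    if a0 ≤ an then unimodal_sortLoop array.tail (result ++ [a0])
    else unimodal_sortLoop array.dropLast (result ++ [an])
  else result
termination_by array.length
decreasing_by
  · simpa [List.length_tail] using Nat.sub_lt (by omega) one_pos
  · simpa [List.length_dropLast] using Nat.sub_lt (by omega) one_pos

def unimodal_sort (array : List Int) : List Int :=
  unimodal_sortLoop array []

-- ===== PORT B =====
-- i, j = 0, len(array)-1; while i <= j: append the smaller of array[i]/array[j],
-- moving the corresponding index inward (indices stay in range throughout).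
def unimodal_sortAltLoop (array : List Int) (i j : Int) (result : List Int) : List Int :=
  if _h : i ≤ j then
    let ai := PySem.List.pyGetD array i 0
    let aj := PySem.List.pyGetD array j 0
    if ai ≤ aj then unimodal_sortAltLoop array (i + 1) j (result ++ [ai])
    else unimodal_sortAltLoop array i (j - 1) (result ++ [aj])
  else result
termination_by (j + 1 - i).toNat
decreasing_by all_goals omega

def unimodal_sort_alt (array : List Int) : List Int :=
  unimodal_sortAltLoop array 0 (PySem.List.len array - 1) []

-- ===== PRECONDITION & SPEC =====
def Spec_unimodal_sort (array : List Int) (out : List Int) : Prop := out = unimodal_sort_alt array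
instance (array : List Int) (out : List Int) : Decidable (Spec_unimodal_sort array out) := by unfold Spec_unimodal_sort; infer_instance

-- ===== CLAIM (what is proved, stated in full; the proofs are below) =====
def Claim_equal_unimodal_sort : Prop := ∀ (array : List Int), Dom_unimodal_sort array → Spec_unimodal_sort array (unimodal_sort array)

-- ===== LEMMAS AND PROOFS =====

-- Invariant: B's loop at indices (i, j) computes what A's loop computes on the
-- sublist array[i..j] (A's current list is exactly that window).
theorem altLoop_eq_loop (array : List Int) :
    ∀ (n : Nat) (i j : Int) (res : List Int), (j + 1 - i).toNat = n → 0 ≤ i → j < array.length →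
      unimodal_sortAltLoop array i j res
        = unimodal_sortLoop ((array.drop i.toNat).take (j + 1 - i).toNat) res := by
  intro n
  induction n with
  | zero =>
    intro i j res hn hi hj
    have hij : ¬ i ≤ j := by omega
    rw [unimodal_sortAltLoop, unimodal_sortLoop]
    simp [hij, hn]
  | succ n ih =>
    intro i j res hn hi hj
    have hij : i ≤ j := by omega
    have hjn : j.toNat < array.length := by omega
    have hin : i.toNat < array.length := by omega
    set sub := (array.drop i.toNat).take (j + 1 - i).toNat with hsub
    have hlen : sub.length = n + 1 := by
      simp [hsub, List.length_take, List.length_drop]; omega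
    have hne : sub ≠ [] := by
      intro h; rw [h] at hlen; simp at hlen
    have hij' : i.toNat + n = j.toNat := by omega
    have h0 : PySem.List.pyGetD sub 0 0 = array[i.toNat] := by
      rw [PySem.List.pyGetD_eq_getElem sub 0 le_rfl (by simp [hlen])]
      simp [hsub, List.getElem_take, List.getElem_drop]
    have hlast : PySem.List.pyGetD sub (-1) 0 = array[j.toNat] := by
      rw [PySem.List.pyGetD_neg_one _ _ hne, List.getLast_eq_getElem]
      simp only [hlen]
      simp [hsub, List.getElem_take, List.getElem_drop, hij']
    have hai : PySem.List.pyGetD array i 0 = array[i.toNat] :=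
      PySem.List.pyGetD_eq_getElem array 0 hi (by omega)
    have haj : PySem.List.pyGetD array j 0 = array[j.toNat] :=
      PySem.List.pyGetD_eq_getElem array 0 (by omega) (by omega)
    have htail : sub.tail = (array.drop (i + 1).toNat).take (j + 1 - (i + 1)).toNat := by
      rw [hsub, ← List.drop_one, List.drop_take, List.drop_drop,
        show i.toNat + 1 = (i + 1).toNat by omega,
        show (j + 1 - i).toNat - 1 = (j + 1 - (i + 1)).toNat by omega]
    have hdl : sub.dropLast = (array.drop i.toNat).take ((j - 1) + 1 - i).toNat := by
      rw [hsub, List.dropLast_eq_take, List.take_take, hlen]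
      congr 1
      have : ((j + 1 - i).toNat : Int) = n + 1 := by omega
      omega
    rw [unimodal_sortAltLoop, unimodal_sortLoop]
    simp only [hij, dif_pos, hlen, Nat.le_add_left, h0, hlast, hai, haj]
    split
    · rw [htail, ih (i + 1) j _ (by omega) (by omega) hj]
    · rw [hdl, ih i (j - 1) _ (by omega) hi (by omega)]

-- ===== VERDICT (by name: the statement is the Claim_ definition above) =====
theorem unimodal_sort_spec : Claim_equal_unimodal_sort := by
  intro array _
  unfold Spec_unimodal_sort unimodal_sort unimodal_sort_alt
  rw [altLoop_eq_loop array ((array.length : Int) + 1 - 1).toNat 0 (PySem.List.len array - 1) []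
      (by simp [PySem.List.len_eq]) le_rfl (by rw [PySem.List.len_eq]; omega)]
  simp [PySem.List.len_eq]
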